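-- pv_equiv track=rewrite | github.com/YaoXuanZhi/ScreenPinKit | src/common/hotkey.py | __orderHotkeyList
-- ===== SOURCE A (Python) =====
-- def __orderHotkeyList(keyNames:list) -> list:
--     if len(keyNames) > 2:
--         new_hotkey = []
--         for mod in keyNames[:-1]:
--             if 'control' == mod:
--                 new_hotkey.append(mod)
--         for mod in keyNames[:-1]:
--             if 'shift' == mod:
--                 new_hotkey.append(mod)
--         for mod in keyNames[:-1]:
--             if 'alt' == mod:
--                 new_hotkey.append(mod)
--         for mod in keyNames[:-1]:
--             if 'super' == mod:
--                 new_hotkey.append(mod)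
--         new_hotkey.append(keyNames[-1])
--         keyNames = new_hotkey
--     return keyNames
-- ===== SOURCE B (Python) =====
-- _PRIORITY = {'control': 0, 'shift': 1, 'alt': 2, 'super': 3}
--
-- def __orderHotkeyList(keyNames: list) -> list:
--     if len(keyNames) <= 2:
--         return keyNames
--     mods = [k for k in keyNames[:-1] if k in _PRIORITY]
--     mods.sort(key=_PRIORITY.__getitem__)
--     return mods + [keyNames[-1]]
-- ===== Notes on version B (the rewrite author's own statement) =====
-- stated objective: simpler
-- what changed: Replaces the four separate fixed-modifier scans with one filter by a priority dict followed by a single stable sort on the priority index.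
import Mathlib
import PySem

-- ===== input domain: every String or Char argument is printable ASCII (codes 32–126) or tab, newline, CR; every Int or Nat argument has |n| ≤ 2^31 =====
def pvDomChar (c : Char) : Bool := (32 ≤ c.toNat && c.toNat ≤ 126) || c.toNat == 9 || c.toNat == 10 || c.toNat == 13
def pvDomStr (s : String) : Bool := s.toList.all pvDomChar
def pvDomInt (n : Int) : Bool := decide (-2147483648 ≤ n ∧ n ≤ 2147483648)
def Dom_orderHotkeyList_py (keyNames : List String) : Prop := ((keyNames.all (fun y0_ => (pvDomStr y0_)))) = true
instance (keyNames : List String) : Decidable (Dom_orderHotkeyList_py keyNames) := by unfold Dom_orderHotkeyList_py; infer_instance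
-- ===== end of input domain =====

-- B reorders the modifiers with one priority-dict filter plus one stable sort instead of A's four fixed scans (objective: simpler).

-- ===== PORT A =====
def orderHotkeyList_py (keyNames : List String) : List String :=
  if keyNames.length > 2 then
    let init := PySem.List.slice keyNames none (some (-1))      -- keyNames[:-1]
    let nh1 := init.foldl (fun acc m => if "control" == m then acc ++ [m] else acc) []
    let nh2 := init.foldl (fun acc m => if "shift" == m then acc ++ [m] else acc) nh1
    let nh3 := init.foldl (fun acc m => if "alt" == m then acc ++ [m] else acc) nh2
    let nh4 := init.foldl (fun acc m => if "super" == m then acc ++ [m] else acc) nh3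
    -- keyNames[-1]: in range since length > 2, so getD's default is never used
    nh4 ++ [(PySem.List.pyGet? keyNames (-1)).getD ""]
  else keyNames

-- ===== PORT B =====
def hotkeyPrio : PySem.Dict String Int :=
  (((PySem.Dict.empty.insert "control" 0).insert "shift" 1).insert "alt" 2).insert "super" 3

def orderHotkeyList_py_alt (keyNames : List String) : List String :=
  if keyNames.length ≤ 2 then keyNames
  else
    let mods := (PySem.List.slice keyNames none (some (-1))).filter
        (fun k => (hotkeyPrio.get? k).isSome)                   -- 'k in _PRIORITY'
    -- mods.sort(key=_PRIORITY.__getitem__); every key is present, so getD's default is never used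
    let sortedMods := PySem.List.sorted mods (fun k => (hotkeyPrio.get? k).getD 0)
    sortedMods ++ [(PySem.List.pyGet? keyNames (-1)).getD ""]

-- ===== PRECONDITION & SPEC =====
def Spec_orderHotkeyList_py (keyNames : List String) (out : List String) : Prop := out = orderHotkeyList_py_alt keyNames
instance (keyNames : List String) (out : List String) : Decidable (Spec_orderHotkeyList_py keyNames out) := by unfold Spec_orderHotkeyList_py; infer_instance

-- ===== CLAIM (what is proved, stated in full; the proofs are below) =====
def Claim_equal_orderHotkeyList_py : Prop := ∀ (keyNames : List String), Dom_orderHotkeyList_py keyNames → Spec_orderHotkeyList_py keyNames (orderHotkeyList_py keyNames)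

-- ===== LEMMAS AND PROOFS =====

def hkKey (k : String) : Int := (hotkeyPrio.get? k).getD 0
def hkKnown (k : String) : Bool := (hotkeyPrio.get? k).isSome
def hkBefore (x y : String) : Bool := decide (hkKey x < hkKey y)

def hkBucket (l : List String) : List String :=
  l.filter (fun m => "control" == m) ++ l.filter (fun m => "shift" == m) ++
  l.filter (fun m => "alt" == m) ++ l.filter (fun m => "super" == m)

theorem hkKnown_iff (x : String) :
    hkKnown x = true ↔ x = "control" ∨ x = "shift" ∨ x = "alt" ∨ x = "super" := by
  constructor
  · intro h
    by_cases h1 : x = "control"; · exact Or.inl h1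
    by_cases h2 : x = "shift"; · exact Or.inr (Or.inl h2)
    by_cases h3 : x = "alt"; · exact Or.inr (Or.inr (Or.inl h3))
    by_cases h4 : x = "super"; · exact Or.inr (Or.inr (Or.inr h4))
    exfalso
    simp [hkKnown, hotkeyPrio, PySem.Dict.get?, PySem.Dict.insert, PySem.Dict.empty] at h
    rcases h with h | h | h | h
    exacts [h1 h.symm, h2 h.symm, h3 h.symm, h4 h.symm]
  · rintro (rfl | rfl | rfl | rfl) <;> decide

theorem insertBy_split (before : String → String → Bool) (x : String)
    (ys zs : List String) (h1 : ∀ y ∈ ys, before x y = false)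
    (h2 : ∀ z ∈ zs, before x z = true) :
    PySem.List.insertBy before x (ys ++ zs) = ys ++ x :: zs := by
  induction ys with
  | nil =>
      cases zs with
      | nil => rfl
      | cons z t => simp [PySem.List.insertBy, h2 z List.mem_cons_self]
  | cons y t ih =>
      simp only [List.cons_append, PySem.List.insertBy, h1 y List.mem_cons_self]
      simp only [Bool.false_eq_true, if_false, List.cons.injEq, true_and]
      exact ih (fun y' hy' => h1 y' (List.mem_cons_of_mem _ hy'))

theorem sorted_append_singleton (xs : List String) (x : String) :
    PySem.List.sorted (xs ++ [x]) hkKey = PySem.List.insertBy hkBefore x (PySem.List.sorted xs hkKey) := by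
  rw [PySem.List.sorted_eq_foldl_insertBy, PySem.List.sorted_eq_foldl_insertBy, List.foldl_append]
  rfl

theorem mem_filter_eq {l : List String} {c y : String}
    (h : y ∈ l.filter (fun m => c == m)) : y = c :=
  (beq_iff_eq.mp (List.mem_filter.mp h).2).symm

theorem known_ne {x : String} (hnx : hkKnown x = false) :
    ("control" == x) = false ∧ ("shift" == x) = false ∧ ("alt" == x) = false ∧ ("super" == x) = false := by
  refine ⟨?_, ?_, ?_, ?_⟩ <;>
  · simp only [beq_eq_false_iff_ne, ne_eq]
    intro e
    rw [← e] at hnx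
    exact absurd hnx (by decide)

theorem hk_sorted_eq_bucket (l : List String) :
    PySem.List.sorted (l.filter hkKnown) hkKey = hkBucket l := by
  induction l using List.reverseRecOn with
  | nil => rfl
  | append_singleton l x ih =>
      rw [List.filter_append]
      by_cases hx : hkKnown x = true
      · have hfx : List.filter hkKnown [x] = [x] := by simp [List.filter, hx]
        rw [hfx, sorted_append_singleton, ih]
        rcases (hkKnown_iff x).mp hx with rfl | rfl | rfl | rfl
        · -- control
          have hsplit := insertBy_split hkBefore "control" (l.filter (fun m => "control" == m)) (l.filter (fun m => "shift" == m) ++ l.filter (fun m => "alt" == m) ++ l.filter (fun m => "super" == m))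
            (by intro y hy
                rw [mem_filter_eq hy]; decide)
            (by intro z hz
                simp only [List.mem_append] at hz
                rcases hz with (hz | hz) | hz <;> (rw [mem_filter_eq hz]; decide))
          rw [show hkBucket l = (l.filter (fun m => "control" == m)) ++ (l.filter (fun m => "shift" == m) ++ l.filter (fun m => "alt" == m) ++ l.filter (fun m => "super" == m)) by simp [hkBucket]]
          rw [hsplit]
          simp [hkBucket, List.filter_append]
        · -- shift
          have hsplit := insertBy_split hkBefore "shift" (l.filter (fun m => "control" == m) ++ l.filter (fun m => "shift" == m)) (l.filter (fun m => "alt" == m) ++ l.filter (fun m => "super" == m))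
            (by intro y hy
                simp only [List.mem_append] at hy
                rcases hy with hy | hy <;> (rw [mem_filter_eq hy]; decide))
            (by intro z hz
                simp only [List.mem_append] at hz
                rcases hz with hz | hz <;> (rw [mem_filter_eq hz]; decide))
          rw [show hkBucket l = (l.filter (fun m => "control" == m) ++ l.filter (fun m => "shift" == m)) ++ (l.filter (fun m => "alt" == m) ++ l.filter (fun m => "super" == m)) by simp [hkBucket]]
          rw [hsplit]
          simp [hkBucket, List.filter_append]
        · -- alt
          have hsplit := insertBy_split hkBefore "alt" (l.filter (fun m => "control" == m) ++ l.filter (fun m => "shift" == m) ++ l.filter (fun m => "alt" == m)) (l.filter (fun m => "super" == m))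
            (by intro y hy
                simp only [List.mem_append] at hy
                rcases hy with (hy | hy) | hy <;> (rw [mem_filter_eq hy]; decide))
            (by intro z hz
                rw [mem_filter_eq hz]; decide)
          rw [show hkBucket l = (l.filter (fun m => "control" == m) ++ l.filter (fun m => "shift" == m) ++ l.filter (fun m => "alt" == m)) ++ (l.filter (fun m => "super" == m)) by simp [hkBucket]]
          rw [hsplit]
          simp [hkBucket, List.filter_append]
        · -- super
          have hsplit := insertBy_split hkBefore "super" (l.filter (fun m => "control" == m) ++ l.filter (fun m => "shift" == m) ++ l.filter (fun m => "alt" == m) ++ l.filter (fun m => "super" == m)) (([] : List String))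
            (by intro y hy
                simp only [List.mem_append] at hy
                rcases hy with ((hy | hy) | hy) | hy <;> (rw [mem_filter_eq hy]; decide))
            (by intro z hz
                simp at hz)
          rw [show hkBucket l = (l.filter (fun m => "control" == m) ++ l.filter (fun m => "shift" == m) ++ l.filter (fun m => "alt" == m) ++ l.filter (fun m => "super" == m)) ++ (([] : List String)) by simp [hkBucket]]
          rw [hsplit]
          simp [hkBucket, List.filter_append]
      · have hnx : hkKnown x = false := by simpa using hx
        obtain ⟨h1, h2, h3, h4⟩ := known_ne hnx
        have hfx : List.filter hkKnown [x] = [] := by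
          simp [List.filter, Bool.eq_false_iff.mp hnx]
        rw [hfx, List.append_nil, ih]
        simp [hkBucket, List.filter_append, h1, h2, h3, h4]

-- ===== VERDICT (by name: the statement is the Claim_ definition above) =====
theorem orderHotkeyList_py_spec : Claim_equal_orderHotkeyList_py := by
  intro keyNames _
  unfold Spec_orderHotkeyList_py orderHotkeyList_py orderHotkeyList_py_alt
  by_cases h : keyNames.length > 2
  · rw [if_pos h, if_neg (by omega)]
    simp only [PySem.List.foldl_append_if_eq_filter, List.nil_append]
    have := hk_sorted_eq_bucket (PySem.List.slice keyNames none (some (-1)))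
    rw [show (fun k => (hotkeyPrio.get? k).isSome) = hkKnown from rfl,
        show (fun k => (hotkeyPrio.get? k).getD 0) = hkKey from rfl, this]
    simp [hkBucket]
  · rw [if_neg h, if_pos (by omega)]
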